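-- pv_equiv track=rewrite | github.com/1000century/Baekjoon | newbaekjoon/코랩 코딩 스터디/대면 스터디/신고결과받기.py | solution
-- ===== SOURCE A (Python) =====
-- def solution(id_list, report, k):
-- 	answer = []
-- 	who_blamed_me = {i:set() for i in id_list}
-- 	mail_cnt = {i:0 for i in id_list}
--
-- 	for text in report:
-- 		a,b = text.split()
-- 		who_blamed_me[b].add(a)
--
-- 	for i in who_blamed_me:
-- 		if len(who_blamed_me[i])>=k:
-- 			for x in who_blamed_me[i]:
-- 				mail_cnt[x] = mail_cnt[x]+1
--
-- 	for i in id_list: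
-- 		answer.append(mail_cnt[i])
-- 	return answer
-- ===== SOURCE B (Python) =====
-- def solution(id_list, report, k):
--     edges = {tuple(t.split()) for t in report}
--     banned = {b for b in id_list
--               if sum(1 for _, t in edges if t == b) >= k}
--     return [sum(1 for s, t in edges if s == i and t in banned)
--             for i in id_list]
-- ===== Notes on version B (the rewrite author's own statement) =====
-- stated objective: alternative
-- what changed: A incrementally fills a dict of per-target reporter sets and distributes increments into a mail-count dict; B keeps no per-user accumulators at all: it dedupes reports into an edge set, computes the banned set once by counting incoming edges per id, and computes each output entry directly by counting that reporter's edges into banned ids.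
import Mathlib
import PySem

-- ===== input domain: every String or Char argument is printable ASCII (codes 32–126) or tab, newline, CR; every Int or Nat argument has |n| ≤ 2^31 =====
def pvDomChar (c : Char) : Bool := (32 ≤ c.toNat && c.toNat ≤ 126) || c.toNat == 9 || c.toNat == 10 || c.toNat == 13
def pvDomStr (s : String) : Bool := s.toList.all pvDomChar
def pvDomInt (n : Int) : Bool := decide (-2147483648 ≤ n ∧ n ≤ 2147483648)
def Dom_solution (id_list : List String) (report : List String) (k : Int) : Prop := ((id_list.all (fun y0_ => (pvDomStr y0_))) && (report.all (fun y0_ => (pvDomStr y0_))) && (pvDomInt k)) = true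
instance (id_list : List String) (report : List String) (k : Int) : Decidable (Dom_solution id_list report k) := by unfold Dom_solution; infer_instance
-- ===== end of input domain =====

-- B keeps no per-user accumulators: it dedupes the reports into an edge set, derives the
-- banned set once, and counts each output entry directly from the edges; objective: alternative.
-- Equivalence is proved on Pre_solution, exactly the inputs on which the Python A returns.


-- shared helper of both ports --
-- the two whitespace-separated words of a report line 'a b' (the Python `text.split()`
-- unpacking / `tuple(t.split())`; ("","") on a malformed line, which Pre_solution excludes:
-- there Python A raises ValueError)
def parseP (t : String) : String × String :=
  match PySem.Str.split₀ t with
  | [a, b] => (a, b)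
  | _ => ("", "")

-- ===== PORT A =====
-- {i: 0 for i in id_list}
def zeroDict (id_list : List String) : PySem.Dict String Int :=
  id_list.foldl (fun d i => d.insert i 0) PySem.Dict.empty

-- who_blamed_me = {i:set() for i in id_list}; for text in report: a,b = split; who_blamed_me[b].add(a)
def aWho (id_list : List String) (report : List String) : PySem.Dict String (PySem.Set String) :=
  report.foldl
    (fun d t => d.modify (parseP t).2 PySem.Set.empty (fun s => PySem.Set.add s (parseP t).1))
    (id_list.foldl (fun d i => d.insert i PySem.Set.empty) PySem.Dict.empty)

-- for i in who_blamed_me: if len(who_blamed_me[i]) >= k: for x in who_blamed_me[i]: mail_cnt[x] += 1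
def aMail (id_list : List String) (report : List String) (k : Int) : PySem.Dict String Int :=
  (aWho id_list report).items.foldl
    (fun m p =>
      if k ≤ (p.2.length : Int) then p.2.foldl (fun m x => m.modify x 0 (· + 1)) m else m)
    (zeroDict id_list)

def solution (id_list : List String) (report : List String) (k : Int) : List Int :=
  id_list.map (fun i => (aMail id_list report k).getD i 0)

-- ===== PORT B =====
-- edges = {tuple(t.split()) for t in report}
def edgesB (report : List String) : PySem.Set (String × String) :=
  PySem.Set.ofList (report.map parseP)

-- banned = {b for b in id_list if sum(1 for _, t in edges if t == b) >= k}
def bannedB (id_list : List String) (report : List String) (k : Int) : PySem.Set String :=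
  PySem.Set.ofList
    (id_list.filter (fun b => decide (k ≤ ((edgesB report).countP (fun p => p.2 == b) : Int))))

-- [sum(1 for s, t in edges if s == i and t in banned) for i in id_list]
def solution_alt (id_list : List String) (report : List String) (k : Int) : List Int :=
  id_list.map
    (fun i =>
      ((edgesB report).countP
          (fun p => p.1 == i && (bannedB id_list report k).contains p.2) : Int))

-- ===== PRECONDITION & SPEC =====
-- Pre_solution is exactly the set of inputs on which Python A returns: every report line
-- splits into two words, the reported id is known, and the reporter is known whenever the
-- reported id collects at least k distinct reports (otherwise A raises ValueError/KeyError).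
def Pre_solution (id_list : List String) (report : List String) (k : Int) : Prop :=
  ∀ t ∈ report, (PySem.Str.split₀ t).length = 2 ∧ (parseP t).2 ∈ id_list ∧
    ((parseP t).1 ∈ id_list ∨
      ((((PySem.Set.ofList (report.map parseP)).map Prod.snd).count (parseP t).2 : Int) < k))
instance (id_list : List String) (report : List String) (k : Int) : Decidable (Pre_solution id_list report k) := by unfold Pre_solution; infer_instance

def pvWitness_solution : List String × List String × Int := (["muzi", "frodo", "apeach", "neo"], ["muzi frodo", "apeach frodo", "frodo neo", "muzi neo", "apeach muzi"], 2)

def Spec_solution (id_list : List String) (report : List String) (k : Int) (out : List Int) : Prop := out = solution_alt id_list report k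
instance (id_list : List String) (report : List String) (k : Int) (out : List Int) : Decidable (Spec_solution id_list report k out) := by unfold Spec_solution; infer_instance

-- ===== CLAIM (what is proved, stated in full; the proofs are below) =====
def Claim_equal_solution : Prop := ∀ (id_list : List String) (report : List String) (k : Int), Dom_solution id_list report k → Pre_solution id_list report k → Spec_solution id_list report k (solution id_list report k)

-- ===== LEMMAS AND PROOFS =====

-- the deduplicated parsed pair list both programs are really about
def pairSet (report : List String) : List (String × String) :=
  PySem.Set.ofList (report.map parseP)

-- a dict built by inserting the constant c looks up to c under default c
theorem getD_foldl_insert_const {ν : Type} (xs : List String) (c : ν) (d : PySem.Dict String ν)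
    (x : String) (h : d.getD x c = c) :
    (xs.foldl (fun d i => d.insert i c) d).getD x c = c := by
  induction xs generalizing d with
  | nil => exact h
  | cons i xs ih =>
      refine ih _ ?_
      rw [PySem.Dict.getD_insert]
      split_ifs <;> simp [h]

theorem getD_zeroDict (id_list : List String) (x : String) :
    (zeroDict id_list).getD x 0 = 0 :=
  getD_foldl_insert_const id_list 0 PySem.Dict.empty x (PySem.Dict.getD_empty x 0)

theorem getD_whoFold (l : List String) (d : PySem.Dict String (PySem.Set String)) (b : String) :
    (l.foldl
        (fun d t => d.modify (parseP t).2 PySem.Set.empty (fun s => PySem.Set.add s (parseP t).1))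
        d).getD b PySem.Set.empty
      = (((l.map parseP).filter (fun p => p.2 == b)).map Prod.fst).foldl PySem.Set.add
          (d.getD b PySem.Set.empty) := by
  induction l generalizing d with
  | nil => simp
  | cons t l ih =>
      simp only [List.foldl_cons, List.map_cons, List.filter_cons, ih, PySem.Dict.getD_modify]
      by_cases h : (parseP t).2 = b
      · simp [h]
      · simp [h, Ne.symm h]

theorem update_of_forall_mem (s : PySem.Set String) (xs : List String)
    (h : ∀ x ∈ xs, x ∈ s) : PySem.Set.update s xs = s := by
  induction xs generalizing s with
  | nil => rfl
  | cons x xs ih =>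
      rw [PySem.Set.update_cons, PySem.Set.add_of_mem (h x (by simp))]
      exact ih s (fun y hy => h y (by simp [hy]))

theorem getD_aMailFold (l : List String) (w : String → PySem.Set String) (k : Int)
    (m : PySem.Dict String Int) (x : String) :
    (l.foldl
        (fun m b =>
          if k ≤ ((w b).length : Int) then (w b).foldl (fun m y => m.modify y 0 (· + 1)) m else m)
        m).getD x 0
      = m.getD x 0
        + ((l.filter (fun b => decide (k ≤ ((w b).length : Int)))).map
            (fun b => ((w b).count x : Int))).sum := by
  induction l generalizing m with
  | nil => simp
  | cons b l ih =>
      simp only [List.foldl_cons, List.filter_cons]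
      by_cases h : k ≤ ((w b).length : Int)
      · rw [if_pos h]
        simp only [h, decide_true, if_pos, List.map_cons, List.sum_cons, ih,
          PySem.Dict.getD_foldl_modify_add_one]
        ring
      · rw [if_neg h]
        simp [h, ih]

theorem ofList_filter_map_fst (l : List (String × String)) (b : String) :
    PySem.Set.ofList ((l.filter (fun p => p.2 == b)).map Prod.fst)
      = ((PySem.Set.ofList l).filter (fun p => p.2 == b)).map Prod.fst := by
  induction l using List.reverseRecOn with
  | nil => rfl
  | append_singleton l p ih =>
      rw [List.filter_append, List.map_append, PySem.Set.ofList_append_singleton]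
      by_cases h : p.2 = b
      · simp only [List.filter_cons, h, beq_self_eq_true, if_pos, List.filter_nil,
          List.map_cons, List.map_nil]
        rw [PySem.Set.ofList_append_singleton]
        by_cases hp : p ∈ PySem.Set.ofList l
        · rw [PySem.Set.add_of_mem hp]
          have h1 : p.1 ∈ PySem.Set.ofList ((l.filter (fun q => q.2 == b)).map Prod.fst) := by
            rw [PySem.Set.mem_ofList]
            exact List.mem_map_of_mem (List.mem_filter.mpr ⟨(PySem.Set.mem_ofList l p).mp hp, by simp [h]⟩)
          rw [PySem.Set.add_of_mem h1, ih]
        · rw [PySem.Set.add_of_not_mem hp]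
          have h1 : p.1 ∉ PySem.Set.ofList ((l.filter (fun q => q.2 == b)).map Prod.fst) := by
            rw [PySem.Set.mem_ofList]
            rintro hmem
            obtain ⟨q, hq, hq1⟩ := List.mem_map.mp hmem
            obtain ⟨hql, hqb⟩ := List.mem_filter.mp hq
            apply hp
            rw [PySem.Set.mem_ofList]
            have : q = p := by
              have hqb' : q.2 = b := by simpa using hqb
              exact Prod.ext hq1 (hqb'.trans h.symm)
            rwa [← this]
          rw [PySem.Set.add_of_not_mem h1, ih, List.filter_append, List.map_append]
          simp [h]
      · simp only [List.filter_cons]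
        simp only [beq_iff_eq, h, if_false, List.filter_nil, List.map_nil, List.append_nil]
        rw [PySem.Set.add_eq_ite]
        by_cases hp : p ∈ PySem.Set.ofList l
        · rw [if_pos hp, ih]
        · rw [if_neg hp, ih, List.filter_append]
          simp [h]

theorem countP_bridge (I : List String) (P : List (String × String)) (x : String)
    (C : String → Bool) (hI : I.Nodup) (hP : P.Nodup) (hsub : ∀ p ∈ P, p.2 ∈ I) :
    I.countP (fun b => decide ((x, b) ∈ P) && C b) = P.countP (fun p => p.1 == x && C p.2) := by
  rw [List.countP_eq_length_filter, List.countP_eq_length_filter]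
  have hperm :
      ((I.filter (fun b => decide ((x, b) ∈ P) && C b)).map (fun b => (x, b))).Perm
        (P.filter (fun p => p.1 == x && C p.2)) := by
    rw [List.perm_ext_iff_of_nodup]
    · intro p
      constructor
      · intro hm
        obtain ⟨b, hb, rfl⟩ := List.mem_map.mp hm
        obtain ⟨hbI, hcond⟩ := List.mem_filter.mp hb
        simp only [Bool.and_eq_true, decide_eq_true_eq] at hcond
        exact List.mem_filter.mpr ⟨hcond.1, by simp [hcond.2]⟩
      · intro hm
        obtain ⟨hpP, hcond⟩ := List.mem_filter.mp hm
        simp only [Bool.and_eq_true, beq_iff_eq] at hcond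
        have hxp : (x, p.2) = p := Prod.ext hcond.1.symm rfl
        refine List.mem_map.mpr ⟨p.2, List.mem_filter.mpr ⟨hsub p hpP, ?_⟩, hxp⟩
        simp only [Bool.and_eq_true, decide_eq_true_eq]
        exact ⟨hxp ▸ hpP, hcond.2⟩
    · exact (hI.filter _).map_on (fun a _ b _ h => by simpa using (Prod.mk.injEq x a x b ▸ h : (x,a) = (x,b)))
    · exact hP.filter _
  have hlen := hperm.length_eq
  rwa [List.length_map] at hlen

theorem mail_agree (id_list : List String) (report : List String) (k : Int)
    (hpre : Pre_solution id_list report k) (i : String) :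
    (aMail id_list report k).getD i 0
      = ((edgesB report).countP
          (fun p => p.1 == i && (bannedB id_list report k).contains p.2) : Int) := by
  have hPn : (pairSet report).Nodup := PySem.Set.nodup_ofList _
  have hsnd : ∀ p ∈ pairSet report, p.2 ∈ id_list := by
    intro p hp
    have hp' := (PySem.Set.mem_ofList (report.map parseP) p).mp hp
    obtain ⟨t, ht, rfl⟩ := List.mem_map.mp hp'
    exact (hpre t ht).2.1
  -- A side: who_blamed_me[b] is the deduped reporter list of b
  have hkeys0 : (id_list.foldl (fun d i => d.insert i (PySem.Set.empty : PySem.Set String))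
      PySem.Dict.empty).keys = PySem.Set.ofList id_list := by
    have h := PySem.Dict.keys_foldl_insert id_list
      (fun _ _ => (PySem.Set.empty : PySem.Set String)) PySem.Dict.empty
    rw [PySem.Dict.keys_empty] at h
    exact h.trans (by rw [PySem.Set.ofList_eq_foldl]; rfl)
  have hkeys : (aWho id_list report).keys = PySem.Set.ofList id_list := by
    have h := PySem.Dict.keys_foldl_modify_key report (fun t => (parseP t).2)
      (PySem.Set.empty : PySem.Set String) (fun _ t => fun s => PySem.Set.add s (parseP t).1)
      (id_list.foldl (fun d i => d.insert i PySem.Set.empty) PySem.Dict.empty)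
    rw [hkeys0] at h
    refine Eq.trans (show (aWho id_list report).keys = _ from h)
      (update_of_forall_mem _ _ ?_)
    intro x hx
    obtain ⟨t, ht, rfl⟩ := List.mem_map.mp hx
    exact (PySem.Set.mem_ofList id_list _).mpr (hpre t ht).2.1
  have hwho : ∀ b, (aWho id_list report).getD b PySem.Set.empty
      = ((pairSet report).filter (fun p => p.2 == b)).map Prod.fst := by
    intro b
    unfold aWho
    rw [getD_whoFold,
      getD_foldl_insert_const id_list PySem.Set.empty PySem.Dict.empty b
        (PySem.Dict.getD_empty b PySem.Set.empty),
      show (PySem.Set.empty : PySem.Set String) = ([] : List String) from rfl,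
      ← PySem.Set.ofList_eq_foldl]
    unfold pairSet
    exact ofList_filter_map_fst (report.map parseP) b
  have hWn : ∀ b, (((pairSet report).filter (fun p => p.2 == b)).map Prod.fst).Nodup := by
    intro b
    refine List.Nodup.map_on ?_ (hPn.filter _)
    intro p hp q hq hfst
    have hp2 := (List.mem_filter.mp hp).2
    have hq2 := (List.mem_filter.mp hq).2
    simp only [beq_iff_eq] at hp2 hq2
    exact Prod.ext hfst (hp2.trans hq2.symm)
  have hlen : ∀ b, (((pairSet report).filter (fun p => p.2 == b)).map Prod.fst).length
      = (pairSet report).countP (fun p => p.2 == b) := by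
    intro b
    rw [List.length_map, ← List.countP_eq_length_filter]
  have hmailA : (aMail id_list report k).getD i 0
      = (((PySem.Set.ofList id_list).filter
            (fun b => decide (k ≤ (((aWho id_list report).getD b PySem.Set.empty).length : Int)))).map
          (fun b => (((aWho id_list report).getD b PySem.Set.empty).count i : Int))).sum := by
    unfold aMail
    rw [PySem.Dict.items_eq_map_keys _ (by rw [hkeys]; exact PySem.Set.nodup_ofList id_list)
        PySem.Set.empty,
      hkeys, List.foldl_map]
    have h := getD_aMailFold (PySem.Set.ofList id_list)
      (fun b => (aWho id_list report).getD b PySem.Set.empty) k (zeroDict id_list) i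
    rw [getD_zeroDict, zero_add] at h
    exact h
  -- assemble: both sides are the countP over the deduped pairs
  rw [hmailA]
  rw [List.filter_congr (fun b _ => by rw [hwho b, hlen b] :
        ∀ b ∈ PySem.Set.ofList id_list,
          decide (k ≤ (((aWho id_list report).getD b PySem.Set.empty).length : Int))
            = decide (k ≤ (((pairSet report).countP (fun p => p.2 == b) : Nat) : Int)))]
  have hmem : ∀ b, i ∈ ((pairSet report).filter (fun p => p.2 == b)).map Prod.fst
      ↔ (i, b) ∈ pairSet report := by
    intro b
    constructor
    · intro hm
      obtain ⟨p, hp, rfl⟩ := List.mem_map.mp hm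
      obtain ⟨hpP, hpb⟩ := List.mem_filter.mp hp
      simp only [beq_iff_eq] at hpb
      rwa [show (p.1, b) = p from Prod.ext rfl hpb.symm]
    · intro hm
      exact List.mem_map.mpr ⟨(i, b), List.mem_filter.mpr ⟨hm, by simp⟩, rfl⟩
  rw [List.map_congr_left (fun b _ => by
      rw [hwho b, List.Nodup.count (hWn b)]
      by_cases hc : (i, b) ∈ pairSet report
      · simp [hmem b, hc]
      · simp [hmem b, hc] :
        ∀ b ∈ (PySem.Set.ofList id_list).filter
            (fun b => decide (k ≤ (((pairSet report).countP (fun p => p.2 == b) : Nat) : Int))),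
          (((aWho id_list report).getD b PySem.Set.empty).count i : Int)
            = if decide ((i, b) ∈ pairSet report) = true then (1 : Int) else 0)]
  rw [PySem.List.sum_map_ite_one_zero, List.countP_filter]
  have hbridge := countP_bridge (PySem.Set.ofList id_list) (pairSet report) i
    (fun b => decide (k ≤ (((pairSet report).countP (fun p => p.2 == b) : Nat) : Int)))
    (PySem.Set.nodup_ofList id_list) hPn
    (fun p hp => (PySem.Set.mem_ofList id_list p.2).mpr (hsnd p hp))
  rw [hbridge]
  -- B side: banned membership reduces to the count condition for pairs of the edge set
  have hEP : edgesB report = pairSet report := rfl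
  have hbanned : ∀ p ∈ pairSet report,
      ((bannedB id_list report k).contains p.2
        = decide (k ≤ (((pairSet report).countP (fun q => q.2 == p.2) : Nat) : Int))) := by
    intro p hp
    have h2 : p.2 ∈ id_list := hsnd p hp
    unfold bannedB
    by_cases hc : k ≤ (((pairSet report).countP (fun q => q.2 == p.2) : Nat) : Int)
    · rw [decide_eq_true hc]
      exact (PySem.Set.contains_iff _ _).mpr ((PySem.Set.mem_ofList _ _).mpr
        (List.mem_filter.mpr ⟨h2, decide_eq_true hc⟩))
    · rw [decide_eq_false hc]
      refine Bool.eq_false_iff.mpr (fun h => hc ?_)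
      exact of_decide_eq_true
        (List.mem_filter.mp ((PySem.Set.mem_ofList _ _).mp ((PySem.Set.contains_iff _ _).mp h))).2
  rw [hEP]
  have hfin := List.countP_congr
    ((fun p hp => by rw [hbanned p hp]) :
      ∀ p ∈ pairSet report,
        ((p.1 == i && decide (k ≤ (((pairSet report).countP (fun q => q.2 == p.2) : Nat) : Int))) = true
          ↔ (p.1 == i && (bannedB id_list report k).contains p.2) = true))
  exact_mod_cast hfin

-- ===== VERDICT (by name: the statement is the Claim_ definition above) =====
theorem solution_spec : Claim_equal_solution := by
  intro id_list report k _hdom hpre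
  unfold Spec_solution solution solution_alt
  exact List.map_congr_left (fun i _ => mail_agree id_list report k hpre i)
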